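-- pv_equiv track=rewrite | github.com/koudougoulaurent/appli_KBIS | core/advanced_views.py | _get_search_recommendations
-- ===== SOURCE A (Python) =====
-- def _get_search_recommendations(query):
--     """Génère des recommandations de recherche"""
--     recommendations = []
--
--     if 'appartement' in query.lower():
--         recommendations.extend([
--             'appartement 2 pièces',
--             'appartement avec balcon',
--             'appartement de standing'
--         ])
--
--     if 'maison' in query.lower():
--         recommendations.extend([
--             'maison avec jardin',
--             'maison individuelle',
--             'maison de ville'
--         ])
--
--     if any(word in query.lower() for word in ['étudiant', 'studio']):
--         recommendations.extend([
--             'studio meublé',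
--             'colocation',
--             'logement étudiant'
--         ])
--
--     return recommendations[:5]  # Limiter à 5 recommandations
-- ===== SOURCE B (Python) =====
-- _BLOCKS = [
--     ['appartement 2 pièces', 'appartement avec balcon', 'appartement de standing'],
--     ['maison avec jardin', 'maison individuelle', 'maison de ville'],
--     ['studio meublé', 'colocation', 'logement étudiant'],
-- ]
--
-- # All 8 possible final answers, precomputed (truncation to 5 included).
-- _RESULTS = {
--     mask: [s for i, b in enumerate(_BLOCKS) if (mask // 2 ** i) % 2 for s in b][:5]
--     for mask in range(8)
-- }
--
-- def _get_search_recommendations(query):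
--     """Génère des recommandations de recherche (bitmask into precomputed answers)."""
--     q = query.lower()
--     mask = ((1 if 'appartement' in q else 0)
--             + 2 * (1 if 'maison' in q else 0)
--             + 4 * (1 if ('étudiant' in q or 'studio' in q) else 0))
--     return _RESULTS[mask]
-- ===== Notes on version B (the rewrite author's own statement) =====
-- stated objective: alternative
-- what changed: Instead of conditionally extending a list three times and slicing, B computes a 3-bit keyword-presence mask and returns the answer from a precomputed table of all 8 possible final results (truncation applied at table-build time).
import Mathlib
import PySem

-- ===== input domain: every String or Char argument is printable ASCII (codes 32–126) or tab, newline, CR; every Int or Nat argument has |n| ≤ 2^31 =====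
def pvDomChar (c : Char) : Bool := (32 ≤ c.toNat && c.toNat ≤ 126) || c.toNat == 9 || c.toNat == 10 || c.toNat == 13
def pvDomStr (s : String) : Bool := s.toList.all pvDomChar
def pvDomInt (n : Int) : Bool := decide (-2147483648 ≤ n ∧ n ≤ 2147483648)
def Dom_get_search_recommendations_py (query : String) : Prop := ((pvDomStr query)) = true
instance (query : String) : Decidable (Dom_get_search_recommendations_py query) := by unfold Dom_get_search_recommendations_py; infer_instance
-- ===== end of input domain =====

-- B computes a 3-bit keyword-presence mask and looks up a precomputed table of all 8 final answers (truncation prebuilt); objective: alternative.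
-- ===== PORT A =====
def get_search_recommendations_py (query : String) : List String :=
  let recommendations : List String := []
  let recommendations :=
    if PySem.Str.isIn "appartement" (PySem.Str.lower query) then
      recommendations ++ ["appartement 2 pièces", "appartement avec balcon", "appartement de standing"]
    else recommendations
  let recommendations :=
    if PySem.Str.isIn "maison" (PySem.Str.lower query) then
      recommendations ++ ["maison avec jardin", "maison individuelle", "maison de ville"]
    else recommendations
  let recommendations :=
    if (["étudiant", "studio"].any (fun word => PySem.Str.isIn word (PySem.Str.lower query))) then
      recommendations ++ ["studio meublé", "colocation", "logement étudiant"]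
    else recommendations
  PySem.List.slice recommendations none (some 5)

-- ===== PORT B =====
def pvBlocks : List (List String) :=
  [ ["appartement 2 pièces", "appartement avec balcon", "appartement de standing"],
    ["maison avec jardin", "maison individuelle", "maison de ville"],
    ["studio meublé", "colocation", "logement étudiant"] ]

-- transliteration of the _RESULTS dict comprehension of Source B; 2 ** i ported as (2:Int)^i.toNat, exact since enumerate indices are ≥ 0
def pvResults : PySem.Dict Int (List String) :=
  (PySem.List.pyRange 0 8 1).foldl
    (fun d mask =>
      d.insert mask
        (PySem.List.slice
          ((PySem.List.enumerate pvBlocks).foldl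
            (fun acc ib =>
              if PySem.Int.mod (PySem.Int.floordiv mask ((2 : Int) ^ ib.1.toNat)) 2 ≠ 0 then acc ++ ib.2 else acc)
            [])
          none (some 5)))
    (PySem.Dict.empty)

def get_search_recommendations_py_alt (query : String) : List String :=
  let q := PySem.Str.lower query
  let mask : Int :=
    (if PySem.Str.isIn "appartement" q then 1 else 0)
    + 2 * (if PySem.Str.isIn "maison" q then 1 else 0)
    + 4 * (if (PySem.Str.isIn "étudiant" q || PySem.Str.isIn "studio" q) then 1 else 0)
  (pvResults.get? mask).getD []   -- _RESULTS[mask]; the key 0..7 is always present, so no KeyError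

-- ===== PRECONDITION & SPEC =====
def Spec_get_search_recommendations_py (query : String) (out : List String) : Prop := out = get_search_recommendations_py_alt query
instance (query : String) (out : List String) : Decidable (Spec_get_search_recommendations_py query out) := by unfold Spec_get_search_recommendations_py; infer_instance

-- ===== CLAIM =====
def Claim_equal_get_search_recommendations_py : Prop := ∀ (query : String), Dom_get_search_recommendations_py query → Spec_get_search_recommendations_py query (get_search_recommendations_py query)

-- ===== LEMMAS AND PROOFS =====

-- ===== VERDICT =====
theorem get_search_recommendations_py_spec : Claim_equal_get_search_recommendations_py := by
  intro query _
  unfold Spec_get_search_recommendations_py get_search_recommendations_py get_search_recommendations_py_alt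
  by_cases h1 : PySem.Chars.isIn ['a', 'p', 'p', 'a', 'r', 't', 'e', 'm', 'e', 'n', 't'] (PySem.Chars.lower query.toList) = true <;>
  by_cases h2 : PySem.Chars.isIn ['m', 'a', 'i', 's', 'o', 'n'] (PySem.Chars.lower query.toList) = true <;>
  by_cases h3 : PySem.Chars.isIn ['é', 't', 'u', 'd', 'i', 'a', 'n', 't'] (PySem.Chars.lower query.toList) = true <;>
  by_cases h4 : PySem.Chars.isIn ['s', 't', 'u', 'd', 'i', 'o'] (PySem.Chars.lower query.toList) = true <;>
    simp only [Bool.not_eq_true] at h1 h2 h3 h4 <;>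
    simp [PySem.Str.isIn, PySem.Str.lower, h1, h2, h3, h4] <;> decide
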